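-- pv_equiv track=rewrite | github.com/Yennayer/Baleares_Game | baleares.py | direction
-- ===== SOURCE A (Python) =====
-- def direction(depart, arrivee):
--     # Récupération des coordonnées de départ et d'arrivée
--     x, y = conversion_ligne(depart[0]), int(depart[1])
--     j, k = conversion_ligne(arrivee[0]), int(arrivee[1])
--     # Si les deux cases sont dans la même ligne ou la même colonne
--     if x == j or y == k:
--         return True
--     # Vérification sur les diagonales
--     for indice in range(1, 8):
--         if (x == j - indice and y == k - indice) or \
--                 (x == j + indice and y == k + indice) or \
--                 (x == j - indice and y == k + indice) or \
--                 (x == j + indice and y == k - indice):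
--             return True
--     return False
--
-- def conversion_ligne(ligne):
--     return ord(ligne) - ord('A')
-- ===== SOURCE B (Python) =====
-- def direction(depart, arrivee):
--     x, y = ord(depart[0]) - ord('A'), int(depart[1])
--     j, k = ord(arrivee[0]) - ord('A'), int(arrivee[1])
--     d = abs(x - j)
--     return x == j or y == k or (d == abs(y - k) and d <= 7)
-- ===== Notes on version B (the rewrite author's own statement) =====
-- stated objective: simpler
-- what changed: The 7-iteration diagonal loop over offsets 1..7 is replaced by the closed-form test abs(x-j)==abs(y-k) with abs(x-j)<=7 (keeping the bound the loop implicitly imposes).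
import Mathlib
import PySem

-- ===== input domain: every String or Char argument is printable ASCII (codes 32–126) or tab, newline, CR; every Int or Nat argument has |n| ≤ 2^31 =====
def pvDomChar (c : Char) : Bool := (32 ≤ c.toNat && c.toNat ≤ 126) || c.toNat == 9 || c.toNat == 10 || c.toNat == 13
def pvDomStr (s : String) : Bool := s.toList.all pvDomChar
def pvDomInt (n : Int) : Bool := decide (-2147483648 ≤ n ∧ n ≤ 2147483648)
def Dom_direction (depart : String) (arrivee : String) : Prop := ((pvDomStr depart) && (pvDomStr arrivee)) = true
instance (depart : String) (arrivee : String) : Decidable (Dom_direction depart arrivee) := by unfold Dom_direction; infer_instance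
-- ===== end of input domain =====

-- ===== PORT A =====
-- B replaces A's 7-iteration diagonal loop by a closed-form |x-j|==|y-k| test with the loop's <=7 bound (objective: simpler).
def conversionLigne (ligne : Char) : Int := (ligne.toNat : Int) - ('A'.toNat : Int)

def direction (depart : String) (arrivee : String) : Bool :=
  match PySem.List.pyGet? depart.toList 0, PySem.List.pyGet? depart.toList 1,
        PySem.List.pyGet? arrivee.toList 0, PySem.List.pyGet? arrivee.toList 1 with
  | some dc, some dd, some ac, some ad =>
    match PySem.Int.ofChars? [dd], PySem.Int.ofChars? [ad] with
    | some y, some k =>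
      let x := conversionLigne dc
      let j := conversionLigne ac
      if x == j || y == k then true
      else (PySem.List.pyRange 1 8 1).any (fun indice =>
        (x == j - indice && y == k - indice) || (x == j + indice && y == k + indice) ||
        (x == j - indice && y == k + indice) || (x == j + indice && y == k - indice))
    | _, _ => false  -- int() raises here: outside Pre_
  | _, _, _, _ => false  -- IndexError here: outside Pre_

-- ===== PORT B =====
def direction_alt (depart : String) (arrivee : String) : Bool :=
  (((PySem.List.pyGet? depart.toList 0).bind fun dc =>
    (PySem.List.pyGet? arrivee.toList 0).bind fun ac =>
    ((PySem.List.pyGet? depart.toList 1).bind fun c => PySem.Int.ofChars? [c]).bind fun y =>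
    ((PySem.List.pyGet? arrivee.toList 1).bind fun c => PySem.Int.ofChars? [c]).map fun k =>
      let x : Int := (dc.toNat : Int) - ('A'.toNat : Int)
      let j : Int := (ac.toNat : Int) - ('A'.toNat : Int)
      let d := (x - j).natAbs
      x == j || y == k || (d == (y - k).natAbs && d ≤ 7)) : Option Bool).getD false

-- ===== PRECONDITION & SPEC =====
-- Pre_: both strings have length ≥ 2 and their second character is an ASCII digit — exactly
-- where Python A returns (otherwise depart[1]/arrivee[1] raises IndexError or int(...) ValueError).
def Pre_direction (depart : String) (arrivee : String) : Prop :=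
  2 ≤ depart.toList.length ∧ 2 ≤ arrivee.toList.length ∧
  (depart.toList.getD 1 ' ').isDigit = true ∧ (arrivee.toList.getD 1 ' ').isDigit = true
instance (depart : String) (arrivee : String) : Decidable (Pre_direction depart arrivee) := by
  unfold Pre_direction; infer_instance
def pvWitness_direction : String × String := ("A1", "C3")

def Spec_direction (depart : String) (arrivee : String) (out : Bool) : Prop := out = direction_alt depart arrivee
instance (depart : String) (arrivee : String) (out : Bool) : Decidable (Spec_direction depart arrivee out) := by unfold Spec_direction; infer_instance

-- ===== CLAIM (what is proved, stated in full; the proofs are below) =====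
def Claim_equal_direction : Prop := ∀ (depart : String) (arrivee : String), Dom_direction depart arrivee → Pre_direction depart arrivee → Spec_direction depart arrivee (direction depart arrivee)

-- ===== LEMMAS AND PROOFS =====
-- The two cores agree for all integers: the loop over offsets 1..7 is the closed-form diagonal test.
theorem direction_core_eq (x y j k : Int) :
    (if x == j || y == k then true
     else (PySem.List.pyRange 1 8 1).any (fun indice =>
        (x == j - indice && y == k - indice) || (x == j + indice && y == k + indice) ||
        (x == j - indice && y == k + indice) || (x == j + indice && y == k - indice)))
    = (x == j || y == k || ((x - j).natAbs == (y - k).natAbs && (x - j).natAbs ≤ 7)) := by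
  rw [Bool.eq_iff_iff]
  simp only [Bool.if_true_left, Bool.or_eq_true, beq_iff_eq, List.any_eq_true,
    PySem.List.mem_pyRange_one, Bool.and_eq_true, decide_eq_true_eq]
  constructor
  · rintro (h | ⟨i, hi, h⟩)
    · exact Or.inl h
    · omega
  · rintro (h | h)
    · exact Or.inl h
    · by_cases hx : x = j
      · exact Or.inl (Or.inl hx)
      · exact Or.inr ⟨((x - j).natAbs : Int), by omega, by omega⟩

theorem direction_spec : Claim_equal_direction := by
  intro depart arrivee _ _
  unfold Spec_direction direction direction_alt
  cases h0 : PySem.List.pyGet? depart.toList 0 <;>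
    cases h1 : PySem.List.pyGet? depart.toList 1 <;>
      cases h2 : PySem.List.pyGet? arrivee.toList 0 <;>
        cases h3 : PySem.List.pyGet? arrivee.toList 1 <;>
          try rfl
  case some.some.some.none dc dd ac =>
    show false =
      (((PySem.Int.ofChars? [dd]).bind fun y =>
        ((none : Option Char).bind fun c => PySem.Int.ofChars? [c]).map fun k =>
          let x : Int := (dc.toNat : Int) - ('A'.toNat : Int)
          let j : Int := (ac.toNat : Int) - ('A'.toNat : Int)
          let d := (x - j).natAbs
          x == j || y == k || (d == (y - k).natAbs && d ≤ 7)) : Option Bool).getD false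
    cases PySem.Int.ofChars? [dd] <;> rfl
  case some.some.some.some dc dd ac ad =>
    show (match PySem.Int.ofChars? [dd], PySem.Int.ofChars? [ad] with
          | some y, some k =>
            let x := conversionLigne dc
            let j := conversionLigne ac
            if x == j || y == k then true
            else (PySem.List.pyRange 1 8 1).any (fun indice =>
              (x == j - indice && y == k - indice) || (x == j + indice && y == k + indice) ||
              (x == j - indice && y == k + indice) || (x == j + indice && y == k - indice))
          | _, _ => false)
        =
      (((PySem.Int.ofChars? [dd]).bind fun y =>
        (PySem.Int.ofChars? [ad]).map fun k =>
          let x : Int := (dc.toNat : Int) - ('A'.toNat : Int)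
          let j : Int := (ac.toNat : Int) - ('A'.toNat : Int)
          let d := (x - j).natAbs
          x == j || y == k || (d == (y - k).natAbs && d ≤ 7)) : Option Bool).getD false
    cases PySem.Int.ofChars? [dd] <;> cases PySem.Int.ofChars? [ad] <;> try rfl
    exact direction_core_eq _ _ _ _
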